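-- pv_equiv track=rewrite | github.com/cjber/georelations | src/common/utils.py | combine_biluo
-- ===== SOURCE A (Python) =====
-- def combine_biluo(tokens: list[str], tags: list[str]) -> tuple[list[str], list[str]]:
--     """
--     Combines multi-token BILUO tags into single entities.
--
--     :param tokens list[str]: [TODO:description]
--     :param tags list[str]: [TODO:description]
--     :rtype tuple[list[str], list[str]]: [TODO:description]
--
--     Example:
--
--     >>> tokens = ['New', 'York', 'is', 'big', '.']
--     >>> tags = ['B-PLACE', 'L-PLACE', 'O', 'O', 'O']
--     >>> tokens, tags = combine_biluo(tokens, tags)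
--
--     >>> tokens
--     ['New York', 'is', 'big', '.']
--     >>> tags
--     ['PLACE', 'O', 'O', 'O']
--     """
--
--     tokens_biluo = tokens.copy()
--     tags_biluo = tags.copy()
--
--     for idx, tag in enumerate(tags_biluo):
--         if idx + 1 < len(tags_biluo) and tag[0] == "B":
--             i = 1
--             while tags_biluo[idx + i][0] not in ["B", "O", "U"]:
--                 tokens_biluo[idx] = tokens_biluo[idx] + " " + tokens_biluo[idx + i]
--                 i += 1
--                 if idx + i == len(tokens_biluo):
--                     break
--     zipped = [
--         (token, tag)
--         for (token, tag) in zip(tokens_biluo, tags_biluo)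
--         if tag[0] not in ["I", "L"]
--     ]
--     tokens_biluo, tags_biluo = zip(*zipped)
--     tags_biluo = [tag[2:] if tag != "O" else tag for tag in tags_biluo]
--     return list(tokens_biluo), tags_biluo
-- ===== SOURCE B (Python) =====
-- def combine_biluo(tokens: list[str], tags: list[str]) -> tuple[list[str], list[str]]:
--     """Backward DP pass precomputes run lengths of mergeable tags, so each entity becomes a
--     single slice join; then one filtered pass emits the outputs (no mutation, no inner scan)."""
--     n = len(tags)
--     # run[j] = number of consecutive tags starting at j whose first char is not B/O/U
--     run = [0] * (n + 1)
--     for j in range(n - 1, -1, -1):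
--         run[j] = run[j + 1] + 1 if tags[j][0] not in "BOU" else 0
--     out_tokens: list[str] = []
--     out_tags: list[str] = []
--     for i, tag in enumerate(tags):
--         if tag[0] in "IL":
--             continue
--         if tag[0] == "B" and i + 1 < n:
--             out_tokens.append(" ".join(tokens[i : i + 1 + run[i + 1]]))
--         else:
--             out_tokens.append(tokens[i])
--         out_tags.append(tag if tag == "O" else tag[2:])
--     return out_tokens, out_tags
-- ===== Notes on version B (the rewrite author's own statement) =====
-- stated objective: alternative
-- what changed: A mutates a copy of tokens in place with a nested while look-ahead, then zips, filters, unpacks with zip(*) and re-maps tags; B first computes a run-length DP array in one backward pass (run[j] = length of the mergeable tag run starting at j), so each entity is produced by a single slice join in one filtered forward pass, with no inner scan, no mutation and no zip round-trip.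
-- outside the precondition, e.g. on combine_biluo(['a', 'b'], ['B-X', 'O', 'O']): A returns (['a', 'b'], ['X', 'O']), B raises IndexError; on combine_biluo(['a'], ['O', '']): A returns (['a'], ['O']), B raises IndexError
import Mathlib
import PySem

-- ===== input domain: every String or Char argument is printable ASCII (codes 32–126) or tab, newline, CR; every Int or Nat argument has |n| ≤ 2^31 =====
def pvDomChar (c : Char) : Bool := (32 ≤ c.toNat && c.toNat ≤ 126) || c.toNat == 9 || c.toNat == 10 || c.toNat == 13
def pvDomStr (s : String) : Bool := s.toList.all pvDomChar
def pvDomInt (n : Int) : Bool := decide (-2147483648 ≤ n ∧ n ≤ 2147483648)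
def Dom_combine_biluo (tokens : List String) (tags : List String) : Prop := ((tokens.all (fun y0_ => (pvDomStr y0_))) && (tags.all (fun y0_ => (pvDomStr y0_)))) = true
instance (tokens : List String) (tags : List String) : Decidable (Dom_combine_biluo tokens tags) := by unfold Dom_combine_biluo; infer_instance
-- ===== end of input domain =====

-- B replaces A's copy-mutate-zip-filter pipeline by a backward run-length DP pass plus one filtered
-- forward pass joining a slice per entity (objective: alternative, same cost); equivalence is about
-- the return value only (A mutates its local copies, not the caller's lists).

-- shared: Python tag[0] (none = empty string, where Python raises), the two membership tests, and tag[2:]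
def pvHead (s : String) : Option Char := s.toList.head?
def pvNotBOU (s : String) : Bool := !(pvHead s == some 'B' || pvHead s == some 'O' || pvHead s == some 'U')
def pvNotIL (s : String) : Bool := !(pvHead s == some 'I' || pvHead s == some 'L')
-- tag[2:] if tag != "O" else tag  — s[2:] = drop 2 (exact for a nonnegative slice start)
def pvTrans (tag : String) : String := if tag == "O" then tag else String.ofList (tag.toList.drop 2)

-- ===== PORT A =====
-- the inner `while` loop; fuel = len(tags) (Python raises only outside Pre_, where getD pads with "")
def pvAWhile (tags : List String) (idx : Nat) (i : Nat) (toks : List String) (fuel : Nat) : List String :=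
  match fuel with
  | 0 => toks
  | Nat.succ f =>
    if pvNotBOU (tags.getD (idx + i) "") then
      let toks' := toks.set idx (toks.getD idx "" ++ " " ++ toks.getD (idx + i) "")
      if idx + (i + 1) = toks'.length then toks'
      else pvAWhile tags idx (i + 1) toks' f
    else toks

-- body of `for idx, tag in enumerate(tags_biluo)`
def pvAStep (tags : List String) (toks : List String) (idx : Nat) : List String :=
  let tag := tags.getD idx ""
  if idx + 1 < tags.length && pvHead tag == some 'B' then pvAWhile tags idx 1 toks tags.length
  else toks

def combine_biluo (tokens : List String) (tags : List String) : List String × List String :=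
  let toks := (List.range tags.length).foldl (pvAStep tags) tokens
  let zipped := (toks.zip tags).filter (fun p => pvNotIL p.2)
  -- zip(*zipped) raises on empty zipped (excluded by Pre_); otherwise it is the pair of projections
  (zipped.map Prod.fst, (zipped.map Prod.snd).map pvTrans)

-- ===== PORT B =====
-- the backward DP loop `for j in range(n-1, -1, -1)` building run, as right-to-left structural
-- recursion (run[j] = run[j+1]+1 if tags[j][0] not in "BOU" else 0; run[n] = 0)
def pvRun : List String → List Nat
  | [] => [0]
  | t :: rest =>
    let r := pvRun rest
    (if pvNotBOU t then r.headD 0 + 1 else 0) :: r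

-- the `for i, tag in enumerate(tags)` pass; tokens[i : i+1+r] with 0 ≤ i is (drop i).take (1+r), exact
def pvBScan (tokens tags : List String) (run : List Nat) : List String → Nat → List String × List String
  | [], _ => ([], [])
  | tag :: rest, i =>
    let (ts, gs) := pvBScan tokens tags run rest (i + 1)
    if pvNotIL tag then
      let text := if pvHead tag == some 'B' && i + 1 < tags.length
        then PySem.Str.join " " ((tokens.drop i).take (1 + run.getD (i + 1) 0))
        else tokens.getD i ""
      (text :: ts, pvTrans tag :: gs)
    else (ts, gs)

def combine_biluo_alt (tokens : List String) (tags : List String) : List String × List String :=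
  pvBScan tokens tags (pvRun tags) tags 0

-- ===== PRECONDITION & SPEC =====
-- Pre_ excludes (a) length-mismatched inputs except the harmless case (tokens longer, no mergeable
-- B tag) — elsewhere A either raises IndexError or its zip silently truncates, an accidental corner
-- B does not reproduce; (b) an empty tag string, on which A raises IndexError; and (c) tags empty or
-- all I/L-headed, on which A raises ValueError at zip(*[]).
def Pre_combine_biluo (tokens : List String) (tags : List String) : Prop :=
  (tokens.length = tags.length ∨
    (tags.length < tokens.length ∧ ∀ t ∈ tags.dropLast, pvHead t ≠ some 'B')) ∧
  (∀ t ∈ tags, t ≠ "") ∧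
    (∃ t ∈ tags, t.toList.head? ≠ some 'I' ∧ t.toList.head? ≠ some 'L')
instance (tokens : List String) (tags : List String) : Decidable (Pre_combine_biluo tokens tags) := by
  unfold Pre_combine_biluo; infer_instance

def pvWitness_combine_biluo : List String × List String :=
  (["New", "York", "is", "big", "."], ["B-PLACE", "L-PLACE", "O", "O", "O"])

def Spec_combine_biluo (tokens : List String) (tags : List String) (out : List String × List String) : Prop := out = combine_biluo_alt tokens tags
instance (tokens : List String) (tags : List String) (out : List String × List String) : Decidable (Spec_combine_biluo tokens tags out) := by unfold Spec_combine_biluo; infer_instance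

-- ===== CLAIM (what is proved, stated in full; the proofs are below) =====
def Claim_equal_combine_biluo : Prop := ∀ (tokens : List String) (tags : List String), Dom_combine_biluo tokens tags → Pre_combine_biluo tokens tags → Spec_combine_biluo tokens tags (combine_biluo tokens tags)

-- ===== LEMMAS AND PROOFS =====

-- proof-side helper: the straight-line accumulation A's while loop performs on the merged slot
def pvBJoin (tokens : List String) (tags : List String) (j : Nat) (fuel : Nat) (acc : String) : String :=
  match fuel with
  | 0 => acc
  | Nat.succ f =>
    if j < tokens.length && pvNotBOU (tags.getD j "") then
      pvBJoin tokens tags (j + 1) f (acc ++ " " ++ tokens.getD j "")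
    else acc

-- the value B computes for the kept token at position idx
def pvF (tokens : List String) (tags : List String) (idx : Nat) : String :=
  if pvHead (tags.getD idx "") == some 'B' && idx + 1 < tags.length
  then PySem.Str.join " " ((tokens.drop idx).take (1 + (pvRun tags).getD (idx + 1) 0))
  else tokens.getD idx ""

lemma pv_set_getD_self (l : List String) (i : Nat) (h : i < l.length) :
    l.set i (l.getD i "") = l := by
  apply List.ext_getElem
  · simp
  · intro k hk1 hk2
    simp only [List.getElem_set]
    split
    · subst k; rw [List.getD_eq_getElem l "" h]
    · rfl

lemma pvBJoin_out (tokens tags : List String) (j f : Nat) (acc : String)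
    (h : tokens.length ≤ j) : pvBJoin tokens tags j f acc = acc := by
  cases f with
  | zero => rfl
  | succ f => simp [pvBJoin, Nat.not_lt.mpr h]

lemma pv_getD_set_ne (l : List String) (i k : Nat) (a : String) (h : k ≠ i) :
    (l.set i a).getD k "" = l.getD k "" := by
  simp [List.getD_eq_getElem?_getD, List.getElem?_set_ne (Ne.symm h)]

lemma pv_getD_set_self (l : List String) (i : Nat) (a : String) (h : i < l.length) :
    (l.set i a).getD i "" = a := by
  simp [List.getD_eq_getElem?_getD, h]

lemma pvAWhile_succ (tags : List String) (idx i : Nat) (toks : List String) (f : Nat) :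
    pvAWhile tags idx i toks (Nat.succ f)
      = if pvNotBOU (tags.getD (idx + i) "") then
          (if idx + (i + 1) = (toks.set idx (toks.getD idx "" ++ " " ++ toks.getD (idx + i) "")).length
           then toks.set idx (toks.getD idx "" ++ " " ++ toks.getD (idx + i) "")
           else pvAWhile tags idx (i + 1)
             (toks.set idx (toks.getD idx "" ++ " " ++ toks.getD (idx + i) "")) f)
        else toks := rfl

lemma pvBJoin_succ (tokens tags : List String) (j f : Nat) (acc : String) :
    pvBJoin tokens tags j (Nat.succ f) acc
      = if (j < tokens.length && pvNotBOU (tags.getD j "")) then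
          pvBJoin tokens tags (j + 1) f (acc ++ " " ++ tokens.getD j "")
        else acc := rfl

lemma pvAWhile_eq (tokens tags : List String) (idx : Nat)
    (hlen : tokens.length = tags.length) :
    ∀ (f i : Nat) (toks : List String) (acc : String),
    toks.length = tags.length → 0 < i → idx + i < tags.length →
    (∀ k, idx < k → toks.getD k "" = tokens.getD k "") →
    (toks.getD idx "" = acc) →
    pvAWhile tags idx i toks f = toks.set idx (pvBJoin tokens tags (idx + i) f acc) := by
  intro f
  induction f with
  | zero =>
    intro i toks acc hl hi hin hk hacc
    show toks = toks.set idx acc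
    rw [← hacc]
    exact (pv_set_getD_self toks idx (by omega)).symm
  | succ f ih =>
    intro i toks acc hl hi hin hk hacc
    have hread : toks.getD (idx + i) "" = tokens.getD (idx + i) "" := hk _ (by omega)
    rw [pvAWhile_succ, pvBJoin_succ]
    by_cases hc : pvNotBOU (tags.getD (idx + i) "") = true
    · have hcond : (idx + i < tokens.length && pvNotBOU (tags.getD (idx + i) "")) = true := by
        rw [hc, Bool.and_true]; exact decide_eq_true (by omega)
      rw [if_pos hc, if_pos hcond, hacc, hread]
      simp only [List.length_set]
      by_cases hend : idx + (i + 1) = toks.length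
      · rw [if_pos hend,
          pvBJoin_out tokens tags (idx + i + 1) f _ (by omega)]
      · rw [if_neg hend,
          ih (i + 1) (toks.set idx (acc ++ " " ++ tokens.getD (idx + i) "")) _
            (by simp [hl]) (by omega) (by omega)
            (fun k hk' => by
              rw [pv_getD_set_ne toks idx k _ (by omega)]; exact hk k hk')
            (pv_getD_set_self toks idx _ (by omega)),
          List.set_set, Nat.add_assoc]
    · have hc' : pvNotBOU (tags.getD (idx + i) "") = false := by
        cases h : pvNotBOU (tags.getD (idx + i) "") with
        | false => rfl
        | true => exact absurd h hc
      have hcond : (idx + i < tokens.length && pvNotBOU (tags.getD (idx + i) "")) = false := by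
        rw [hc', Bool.and_false]
      rw [if_neg (show ¬_ = true by rw [hc']; exact Bool.false_ne_true),
        if_neg (show ¬_ = true by rw [hcond]; exact Bool.false_ne_true)]
      rw [← hacc]
      exact (pv_set_getD_self toks idx (by omega)).symm

-- pvRun computes the takeWhile run length at every index
lemma pvRun_getD (tags : List String) :
    ∀ j, (pvRun tags).getD j 0 = ((tags.drop j).takeWhile pvNotBOU).length := by
  induction tags with
  | nil => intro j; cases j <;> simp [pvRun]
  | cons t rest ih =>
    intro j
    cases j with
    | zero =>
      show (if pvNotBOU t then (pvRun rest).headD 0 + 1 else 0) = _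
      have hh : (pvRun rest).headD 0 = (pvRun rest).getD 0 0 := by
        cases pvRun rest <;> simp
      by_cases hc : pvNotBOU t = true
      · rw [if_pos hc, hh, ih 0]
        simp [hc]
      · simp only [Bool.not_eq_true] at hc
        simp [hc]
    | succ j =>
      show (pvRun rest).getD j 0 = _
      simpa using ih j

lemma pv_join_cons (x y : String) (l : List String) :
    PySem.Str.join " " (x :: y :: l) = PySem.Str.join " " ((x ++ " " ++ y) :: l) := by
  cases l with
  | nil =>
    simp [PySem.Str.join, PySem.Chars.join_cons_cons, PySem.Chars.join_singleton,
      String.toList_append]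
  | cons z l =>
    simp [PySem.Str.join, PySem.Chars.join_cons_cons, String.toList_append, List.append_assoc]

lemma pv_join_foldl (l : List String) : ∀ x : String,
    PySem.Str.join " " (x :: l) = l.foldl (fun a t => a ++ " " ++ t) x := by
  induction l with
  | nil => intro x; simp [PySem.Str.join, PySem.Chars.join_singleton]
  | cons y l ih =>
    intro x
    rw [pv_join_cons, ih (x ++ " " ++ y)]
    rfl

lemma pvBJoin_foldl (tokens tags : List String) (hlen : tokens.length = tags.length) :
    ∀ (fuel j : Nat) (acc : String),
    ((tags.drop j).takeWhile pvNotBOU).length ≤ fuel →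
    pvBJoin tokens tags j fuel acc
      = ((tokens.drop j).take ((tags.drop j).takeWhile pvNotBOU).length).foldl
          (fun a t => a ++ " " ++ t) acc := by
  intro fuel
  induction fuel with
  | zero =>
    intro j acc hle
    have h0 : ((tags.drop j).takeWhile pvNotBOU).length = 0 := by omega
    simp [pvBJoin, h0]
  | succ f ih =>
    intro j acc hle
    by_cases hj : j < tags.length
    · have hdt : tags.drop j = tags[j] :: tags.drop (j + 1) := List.drop_eq_getElem_cons hj
      have hjt : j < tokens.length := by omega
      have hdk : tokens.drop j = tokens[j] :: tokens.drop (j + 1) := List.drop_eq_getElem_cons hjt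
      have hgd : tags.getD j "" = tags[j] := List.getD_eq_getElem tags "" hj
      have hgk : tokens.getD j "" = tokens[j] := List.getD_eq_getElem tokens "" hjt
      by_cases hc : pvNotBOU tags[j] = true
      · have hTW : (tags.drop j).takeWhile pvNotBOU
            = tags[j] :: (tags.drop (j + 1)).takeWhile pvNotBOU := by
          rw [hdt, List.takeWhile_cons, if_pos hc]
        rw [pvBJoin_succ, if_pos (by rw [hgd, hc, Bool.and_true]; exact decide_eq_true hjt)]
        rw [hTW, hdk]
        simp only [List.length_cons, List.take_succ_cons, List.foldl_cons]
        rw [hgk, ih (j + 1) (acc ++ " " ++ tokens[j]) (by rw [hTW] at hle; simpa using hle)]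
      · have hc' : pvNotBOU tags[j] = false := by
          cases h : pvNotBOU tags[j] with
          | false => rfl
          | true => exact absurd h hc
        have hTW : ((tags.drop j).takeWhile pvNotBOU).length = 0 := by
          rw [hdt, List.takeWhile_cons, if_neg (by rw [hc']; exact Bool.false_ne_true)]; rfl
        rw [pvBJoin_succ, if_neg (by rw [hgd, hc', Bool.and_false]; exact Bool.false_ne_true)]
        simp [hTW]
    · have hd1 : tags.drop j = [] := List.drop_eq_nil_of_le (by omega)
      rw [pvBJoin_succ,
        if_neg (by rw [Bool.and_eq_true, decide_eq_true_eq]; omega)]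
      simp [hd1]

-- A's merged slot equals B's slice join
lemma pvBJoin_eq_join (tokens tags : List String) (hlen : tokens.length = tags.length)
    (idx : Nat) (hidx : idx + 1 ≤ tags.length) :
    pvBJoin tokens tags (idx + 1) tags.length (tokens.getD idx "")
      = PySem.Str.join " " ((tokens.drop idx).take (1 + (pvRun tags).getD (idx + 1) 0)) := by
  have hL : ((tags.drop (idx + 1)).takeWhile pvNotBOU).length ≤ tags.length :=
    le_trans ((List.takeWhile_sublist _).length_le) (by simp)
  rw [pvRun_getD tags (idx + 1),
    pvBJoin_foldl tokens tags hlen tags.length (idx + 1) _ hL]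
  set L := ((tags.drop (idx + 1)).takeWhile pvNotBOU).length with hLdef
  have hidxt : idx < tokens.length := by omega
  have hdk : tokens.drop idx = tokens[idx] :: tokens.drop (idx + 1) := List.drop_eq_getElem_cons hidxt
  have hgk : tokens.getD idx "" = tokens[idx] := List.getD_eq_getElem tokens "" hidxt
  rw [hdk, Nat.add_comm 1 L, List.take_succ_cons, pv_join_foldl, hgk]

lemma pvFold_inv (tokens tags : List String) (hlen : tokens.length = tags.length) :
    ∀ m, m ≤ tags.length →
    ((List.range m).foldl (pvAStep tags) tokens).length = tags.length ∧
    (∀ k, k < m → ((List.range m).foldl (pvAStep tags) tokens).getD k "" = pvF tokens tags k) ∧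
    (∀ k, m ≤ k → ((List.range m).foldl (pvAStep tags) tokens).getD k "" = tokens.getD k "") := by
  intro m
  induction m with
  | zero => intro _; exact ⟨hlen, fun k hk => absurd hk (by omega), fun k _ => rfl⟩
  | succ m ih =>
    intro hm
    obtain ⟨hL, hlt, hge⟩ := ih (by omega)
    rw [List.range_succ, List.foldl_append, List.foldl_cons, List.foldl_nil]
    set S := (List.range m).foldl (pvAStep tags) tokens with hS
    unfold pvAStep
    by_cases hc : (m + 1 < tags.length && pvHead (tags.getD m "") == some 'B') = true
    · rw [if_pos hc]
      have hc1 : m + 1 < tags.length := by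
        have := hc; simp only [Bool.and_eq_true, decide_eq_true_eq] at this; exact this.1
      have hc2 : (pvHead (tags.getD m "") == some 'B') = true := by
        have := hc; simp only [Bool.and_eq_true] at this; exact this.2
      have hSm : S.getD m "" = tokens.getD m "" := hge m le_rfl
      have hW := pvAWhile_eq tokens tags m hlen tags.length 1 S (S.getD m "") hL
        (by omega) (by omega) (fun k hk => hge k (by omega)) rfl
      rw [hW, hSm]
      refine ⟨by simp [hL], ?_, ?_⟩
      · intro k hk
        rcases Nat.lt_succ_iff_lt_or_eq.mp hk with h | h
        · rw [pv_getD_set_ne S m k _ (by omega)]; exact hlt k h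
        · subst h
          rw [pv_getD_set_self S k _ (by omega)]
          rw [pvBJoin_eq_join tokens tags hlen k (by omega)]
          unfold pvF
          rw [if_pos (show _ = true by rw [hc2, Bool.true_and]; exact decide_eq_true hc1)]
      · intro k hk
        rw [pv_getD_set_ne S m k _ (by omega)]; exact hge k (by omega)
    · rw [if_neg hc]
      refine ⟨hL, ?_, fun k hk => hge k (by omega)⟩
      intro k hk
      rcases Nat.lt_succ_iff_lt_or_eq.mp hk with h | h
      · exact hlt k h
      · subst h
        have : pvF tokens tags k = tokens.getD k "" := by
          unfold pvF
          rw [if_neg (by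
            intro hcon
            apply hc
            simp only [Bool.and_eq_true, decide_eq_true_eq] at hcon ⊢
            exact ⟨hcon.2, hcon.1⟩)]
        rw [this]; exact hge k le_rfl

lemma pvScan_eq (tokens tags T : List String)
    (hT : tags.length ≤ T.length)
    (hTk : ∀ k, k < tags.length → T.getD k "" = pvF tokens tags k) :
    ∀ (c i : Nat), i + c = tags.length →
    ((((T.drop i).zip (tags.drop i)).filter (fun p => pvNotIL p.2)).map Prod.fst,
     ((((T.drop i).zip (tags.drop i)).filter (fun p => pvNotIL p.2)).map Prod.snd).map pvTrans)
      = pvBScan tokens tags (pvRun tags) (tags.drop i) i := by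
  intro c
  induction c with
  | zero =>
    intro i hi
    have h1 : tags.drop i = [] := List.drop_eq_nil_of_le (by omega)
    simp [h1, List.zip_nil_right, pvBScan]
  | succ c ih =>
    intro i hi
    have hi' : i < tags.length := by omega
    have hiT : i < T.length := by omega
    rw [List.drop_eq_getElem_cons hi', List.drop_eq_getElem_cons hiT, List.zip_cons_cons]
    have hrec := ih (i + 1) (by omega)
    have hTi : T[i] = pvF tokens tags i := by
      rw [← List.getD_eq_getElem T "" hiT]; exact hTk i hi'
    have htagi : tags.getD i "" = tags[i] := List.getD_eq_getElem tags "" hi'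
    by_cases hk : pvNotIL tags[i] = true
    · rw [List.filter_cons_of_pos (by simpa using hk)]
      simp only [List.map_cons]
      show (T[i] :: _, pvTrans tags[i] :: _) = _
      rw [show pvBScan tokens tags (pvRun tags) (tags[i] :: tags.drop (i + 1)) i
            = ((if pvHead tags[i] == some 'B' && i + 1 < tags.length
                then PySem.Str.join " " ((tokens.drop i).take (1 + (pvRun tags).getD (i + 1) 0))
                else tokens.getD i "") :: (pvBScan tokens tags (pvRun tags) (tags.drop (i + 1)) (i + 1)).1,
               pvTrans tags[i] :: (pvBScan tokens tags (pvRun tags) (tags.drop (i + 1)) (i + 1)).2) from by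
            simp [pvBScan, hk]]
      rw [← hrec, hTi]
      unfold pvF
      rw [htagi]
    · rw [List.filter_cons_of_neg (by simpa using hk)]
      rw [show pvBScan tokens tags (pvRun tags) (tags[i] :: tags.drop (i + 1)) i
            = pvBScan tokens tags (pvRun tags) (tags.drop (i + 1)) (i + 1) from by simp [pvBScan, hk]]
      exact hrec

-- in the no-mergeable-B case A's mutation pass is the identity
lemma pvFold_id (tokens tags : List String)
    (hnoB : ∀ t ∈ tags.dropLast, pvHead t ≠ some 'B') :
    ∀ m, m ≤ tags.length → (List.range m).foldl (pvAStep tags) tokens = tokens := by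
  intro m
  induction m with
  | zero => intro _; rfl
  | succ m ih =>
    intro hm
    rw [List.range_succ, List.foldl_append, List.foldl_cons, List.foldl_nil, ih (by omega)]
    unfold pvAStep
    by_cases h1 : m + 1 < tags.length
    · have hmem : tags[m] ∈ tags.dropLast := by
        have hm' : m < tags.dropLast.length := by rw [List.length_dropLast]; omega
        have := List.getElem_mem hm'
        rwa [List.getElem_dropLast] at this
      have hgd : tags.getD m "" = tags[m]'(by omega) := List.getD_eq_getElem tags "" (by omega)
      rw [if_neg (by
        rw [hgd]
        simp only [Bool.and_eq_true, beq_iff_eq]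
        rintro ⟨-, hB⟩
        exact hnoB _ hmem hB)]
    · rw [if_neg (by
        simp only [Bool.and_eq_true, decide_eq_true_eq]
        rintro ⟨h, -⟩
        exact h1 h)]

-- ===== VERDICT (by name: the statement is the Claim_ definition above) =====
theorem combine_biluo_spec : Claim_equal_combine_biluo := by
  intro tokens tags _ hpre
  obtain ⟨hlen, -, -⟩ := hpre
  unfold Spec_combine_biluo combine_biluo combine_biluo_alt
  rcases hlen with heq | ⟨hlt, hnoB⟩
  · obtain ⟨hL, hltk, -⟩ := pvFold_inv tokens tags heq tags.length le_rfl
    have h := pvScan_eq tokens tags _ (le_of_eq hL.symm) (fun k hk => hltk k hk) tags.length 0 (by omega)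
    simp only [List.drop_zero] at h
    exact h
  · show (((((List.range tags.length).foldl (pvAStep tags) tokens).zip tags).filter
        (fun p => pvNotIL p.2)).map Prod.fst,
      (((((List.range tags.length).foldl (pvAStep tags) tokens).zip tags).filter
        (fun p => pvNotIL p.2)).map Prod.snd).map pvTrans) = _
    rw [pvFold_id tokens tags hnoB tags.length le_rfl]
    have hTk : ∀ k, k < tags.length → tokens.getD k "" = pvF tokens tags k := by
      intro k hk
      unfold pvF
      rw [if_neg (by
        simp only [Bool.and_eq_true, beq_iff_eq, decide_eq_true_eq]
        rintro ⟨hB, h1⟩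
        have hmem : tags[k] ∈ tags.dropLast := by
          have hk' : k < tags.dropLast.length := by rw [List.length_dropLast]; omega
          have := List.getElem_mem hk'
          rwa [List.getElem_dropLast] at this
        exact hnoB _ hmem (by rwa [List.getD_eq_getElem tags "" hk] at hB))]
    have h := pvScan_eq tokens tags tokens (by omega) hTk tags.length 0 (by omega)
    simp only [List.drop_zero] at h
    exact h
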